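-- pv_equiv track=rewrite | github.com/maedekey/geospatialData | db.py | retrieveStations
-- ===== SOURCE A (Python) =====
-- def retrieveStations(arrivalStation, departureStation):
--     """
--     Function that finds a common tripID for an arrival station and a destination station
--     :param arrivalStation: list of tuples of (arrivalStations, tripID) (only the tripID changes)
--     :param departureStation: list of tuples of (departureStations, tripID) (only the tripID changes)
--     :return: tuples with tripID in common
--     """
--     stationDico = {}
--     for station in departureStation:
--         keyTrip = station[-1]
--         if keyTrip in stationDico:
--             stationDico[keyTrip].append(station)
--         else:
--             stationDico[keyTrip] = [station]
--     validDepartureStation = []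
--     validArrivalStation = []
--     for station in arrivalStation:
--         keyTrip = station[-1]
--         if keyTrip in stationDico:
--             validDepartureStation.append(stationDico[keyTrip])
--             validArrivalStation.append(station)
--     return validArrivalStation, validDepartureStation
-- ===== SOURCE B (Python) =====
-- def retrieveStations(arrivalStation, departureStation):
--     """
--     Nested-scan join: for each arrival station, rescan departures for the same tripID.
--     """
--     validArrivalStation = []
--     validDepartureStation = []
--     for station in arrivalStation:
--         key = station[-1]
--         matches = [d for d in departureStation if d[-1] == key]
--         if matches:
--             validArrivalStation.append(station)
--             validDepartureStation.append(matches)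
--     return validArrivalStation, validDepartureStation
-- ===== Notes on version B (the rewrite author's own statement) =====
-- stated objective: simpler
-- what changed: Replaced the build-a-dict-then-lookup hash join by a single loop over arrivals that rescans the departure list with a filter comprehension; no dictionary or grouping pass remains.
import Mathlib
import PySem

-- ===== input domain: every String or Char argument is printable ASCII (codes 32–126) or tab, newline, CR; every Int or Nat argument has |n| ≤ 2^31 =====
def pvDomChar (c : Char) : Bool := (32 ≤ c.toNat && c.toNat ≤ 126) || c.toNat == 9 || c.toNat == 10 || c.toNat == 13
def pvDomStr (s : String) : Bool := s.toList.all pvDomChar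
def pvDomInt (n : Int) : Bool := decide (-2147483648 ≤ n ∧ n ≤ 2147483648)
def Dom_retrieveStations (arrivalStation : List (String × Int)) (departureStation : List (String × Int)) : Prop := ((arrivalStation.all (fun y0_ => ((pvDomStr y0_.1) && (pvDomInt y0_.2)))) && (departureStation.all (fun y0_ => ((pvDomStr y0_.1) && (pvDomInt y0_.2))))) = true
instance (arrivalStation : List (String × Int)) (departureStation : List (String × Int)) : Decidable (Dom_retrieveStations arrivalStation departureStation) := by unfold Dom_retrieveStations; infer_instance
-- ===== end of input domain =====

-- B replaces A's build-a-dict-then-lookup hash join by a single loop over arrivals that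
-- rescans the departure list with a filter (simpler; no grouping pass).

-- ===== PORT A =====
-- hash join: group departures by tripID in a dict, then look each arrival's tripID up
def retrieveStations (arrivalStation : List (String × Int)) (departureStation : List (String × Int)) : (List (String × Int)) × (List (List (String × Int))) :=
  let stationDico : PySem.Dict Int (List (String × Int)) :=
    departureStation.foldl (fun dic station =>
      let keyTrip := station.2          -- station[-1] of a 2-tuple
      if dic.contains keyTrip then
        dic.modify keyTrip [] (fun l => l ++ [station])   -- stationDico[keyTrip].append(station)
      else
        dic.insert keyTrip [station]) PySem.Dict.empty
  let res :=  -- (validDepartureStation, validArrivalStation), in Python's declaration order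
    arrivalStation.foldl (fun (acc : List (List (String × Int)) × List (String × Int)) station =>
      let keyTrip := station.2
      if stationDico.contains keyTrip then
        (acc.1 ++ [stationDico.getD keyTrip []], acc.2 ++ [station])  -- d[k] exact under the contains guard
      else acc) ([], [])
  (res.2, res.1)

-- ===== PORT B =====
-- nested-scan join: rescan departures for each arrival
def retrieveStations_alt (arrivalStation : List (String × Int)) (departureStation : List (String × Int)) : (List (String × Int)) × (List (List (String × Int))) :=
  arrivalStation.foldl (fun (acc : List (String × Int) × List (List (String × Int))) station =>
    let ms := departureStation.filter (fun d => d.2 == station.2)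
    if !ms.isEmpty then
      (acc.1 ++ [station], acc.2 ++ [ms])
    else acc) ([], [])

-- ===== PRECONDITION & SPEC =====
def Spec_retrieveStations (arrivalStation : List (String × Int)) (departureStation : List (String × Int)) (out : (List (String × Int)) × (List (List (String × Int)))) : Prop := out = retrieveStations_alt arrivalStation departureStation
instance (arrivalStation : List (String × Int)) (departureStation : List (String × Int)) (out : (List (String × Int)) × (List (List (String × Int)))) : Decidable (Spec_retrieveStations arrivalStation departureStation out) := by unfold Spec_retrieveStations; infer_instance

-- ===== CLAIM (what is proved, stated in full; the proofs are below) =====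
def Claim_equal_retrieveStations : Prop := ∀ (arrivalStation : List (String × Int)) (departureStation : List (String × Int)), Dom_retrieveStations arrivalStation departureStation → Spec_retrieveStations arrivalStation departureStation (retrieveStations arrivalStation departureStation)

-- ===== LEMMAS AND PROOFS =====

-- A's two-branch dict update is exactly a `modify` with default []
theorem dicoBody_eq (dic : PySem.Dict Int (List (String × Int))) (s : String × Int) :
    (if dic.contains s.2 then dic.modify s.2 [] (fun l => l ++ [s])
     else dic.insert s.2 [s]) = dic.modify s.2 [] (fun l => l ++ [s]) := by
  by_cases h : dic.contains s.2
  · simp [h]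
  · have hg : dic.getD s.2 [] = [] :=
      PySem.Dict.getD_of_not_contains dic [] (by simpa using h)
    simp [h, PySem.Dict.modify, hg]

theorem dico_getD (departureStation : List (String × Int)) (k : Int) :
    (departureStation.foldl (fun dic s => dic.modify s.2 [] (fun l => l ++ [s]))
      PySem.Dict.empty).getD k []
    = departureStation.filter (fun d => d.2 == k) := by
  have h := PySem.Dict.getD_foldl_modify_append
      (l := departureStation.map (fun s => (s.2, s)))
      (d := (PySem.Dict.empty : PySem.Dict Int (List (String × Int)))) (c := k)
  rw [List.foldl_map] at h
  simpa [List.filter_map, Function.comp_def] using h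

theorem dico_contains (departureStation : List (String × Int)) (k : Int) :
    (departureStation.foldl (fun dic s => dic.modify s.2 [] (fun l => l ++ [s]))
      PySem.Dict.empty).contains k
    = !(departureStation.filter (fun d => d.2 == k)).isEmpty := by
  rw [PySem.Dict.contains_eq_decide_mem_keys,
      PySem.Dict.keys_foldl_modify_key (key := fun s : String × Int => s.2)]
  rw [Bool.eq_iff_iff]
  simp only [PySem.Dict.keys_empty, PySem.Set.update_nil_left, PySem.Set.mem_ofList,
    decide_eq_true_eq, Bool.not_eq_true', List.isEmpty_eq_false_iff, Ne,
    List.filter_eq_nil_iff, List.mem_map, not_forall, not_not, beq_iff_eq]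
  tauto

-- the two join loops agree (A keeps the accumulator components swapped)
theorem loops_eq (departureStation : List (String × Int)) :
    ∀ (l : List (String × Int)) (x : List (List (String × Int))) (y : List (String × Int)),
    (l.foldl (fun (acc : List (List (String × Int)) × List (String × Int)) s =>
        if !(departureStation.filter (fun d => d.2 == s.2)).isEmpty then
          (acc.1 ++ [departureStation.filter (fun d => d.2 == s.2)], acc.2 ++ [s])
        else acc) (x, y))
    = (Prod.swap (l.foldl (fun (acc : List (String × Int) × List (List (String × Int))) s =>
        if !(departureStation.filter (fun d => d.2 == s.2)).isEmpty then
          (acc.1 ++ [s], acc.2 ++ [departureStation.filter (fun d => d.2 == s.2)])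
        else acc) (y, x))) := by
  intro l
  induction l with
  | nil => intro x y; rfl
  | cons s t ih =>
    intro x y
    simp only [List.foldl_cons]
    by_cases h : (!(departureStation.filter (fun d => d.2 == s.2)).isEmpty) = true
    · rw [if_pos h, if_pos h]; exact ih _ _
    · rw [if_neg h, if_neg h]; exact ih _ _

-- ===== VERDICT (by name: the statement is the Claim_ definition above) =====
theorem retrieveStations_spec : Claim_equal_retrieveStations := by
  intro a d _
  unfold Spec_retrieveStations retrieveStations retrieveStations_alt
  have hdic : (d.foldl (fun dic s =>
      if dic.contains s.2 then dic.modify s.2 [] (fun l => l ++ [s])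
      else dic.insert s.2 [s]) PySem.Dict.empty)
      = d.foldl (fun dic s => dic.modify s.2 [] (fun l => l ++ [s])) PySem.Dict.empty := by
    apply PySem.List.foldl_congr_mem
    intro dic s _
    exact dicoBody_eq dic s
  simp only [hdic, dico_getD, dico_contains]
  rw [loops_eq]
  simp
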